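-- pv_equiv track=rewrite | github.com/NikodemMierski/ClusteringCI | gaussian_dbscan.py | include_isolated_points
-- ===== SOURCE A (Python) =====
-- def include_isolated_points(lst):
--     lst = list(lst)
--
--     i = 0
--     while i < len(lst) - 1:
--         j = i + 1
--         while j < len(lst) and lst[j] == lst[i]:
--             j += 1
--
--         sequence_length = j - i
--
--         if sequence_length == 1 and i > 0 and j < len(lst) and lst[i - 1] == lst[j]:
--             for k in range(i, j):
--                 if lst[k] != lst[i - 1]:
--                     lst[k] = lst[i - 1]
--
--         i = j
--
--     return lst
-- ===== SOURCE B (Python) =====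
-- def include_isolated_points(lst):
--     lst = list(lst)
--     for i in range(1, len(lst) - 1):
--         if lst[i] != lst[i - 1] and lst[i - 1] == lst[i + 1]:
--             lst[i] = lst[i - 1]
--     return lst
-- ===== Notes on version B (the rewrite author's own statement) =====
-- stated objective: simpler
-- what changed: Replaced A's run-detecting nested while-loops (inner run counter plus an inner rewrite loop) by one flat in-place sweep that fixes each isolated element i directly when lst[i] != lst[i-1] and lst[i-1] == lst[i+1].
import Mathlib
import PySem

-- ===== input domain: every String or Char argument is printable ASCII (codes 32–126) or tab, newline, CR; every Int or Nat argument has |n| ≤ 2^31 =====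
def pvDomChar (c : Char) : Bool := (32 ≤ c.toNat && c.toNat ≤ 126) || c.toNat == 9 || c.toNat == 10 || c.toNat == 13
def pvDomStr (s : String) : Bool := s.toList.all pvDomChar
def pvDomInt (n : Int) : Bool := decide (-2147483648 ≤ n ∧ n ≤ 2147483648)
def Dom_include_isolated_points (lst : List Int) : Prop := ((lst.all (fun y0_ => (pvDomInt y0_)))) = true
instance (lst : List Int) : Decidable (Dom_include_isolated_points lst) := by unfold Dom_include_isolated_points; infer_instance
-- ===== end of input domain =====

-- B replaces A's run-detecting nested while-loops by a single in-place sweep that fixes each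
-- isolated element directly (objective: simpler; same return value, return-value equivalence proved).

-- ===== PORT A =====
-- inner while: `while j < len(lst) and lst[j] == lst[i]: j += 1`
def aInner (cur : List Int) (i j : Nat) : Nat :=
  if h : j < cur.length ∧ cur.getD j 0 = cur.getD i 0 then aInner cur i (j + 1) else j
termination_by cur.length - j
decreasing_by omega

-- needed by aLoop's termination proof
theorem aInner_ge (cur : List Int) (i j : Nat) : j ≤ aInner cur i j := by
  fun_induction aInner with
  | case1 j h ih => omega
  | case2 j h => omega

-- inner for: `for k in range(i, j): if lst[k] != lst[i-1]: lst[k] = lst[i-1]`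
def aFix (cur : List Int) (i j : Nat) : List Int :=
  (List.range' i (j - i)).foldl
    (fun a k => if a.getD k 0 ≠ a.getD (i - 1) 0 then a.set k (a.getD (i - 1) 0) else a) cur

-- needed by aLoop's termination proof
theorem aFix_length (cur : List Int) (i j : Nat) : (aFix cur i j).length = cur.length := by
  unfold aFix
  generalize List.range' i (j - i) = l
  induction l generalizing cur with
  | nil => rfl
  | cons k l ih =>
    simp only [List.foldl_cons]
    split
    · rw [ih, List.length_set]
    · rw [ih]

-- outer while: `while i < len(lst) - 1: …; i = j`
def aLoop (cur : List Int) (i : Nat) : List Int :=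
  if h : i < cur.length - 1 then
    aLoop
      (if aInner cur i (i + 1) - i = 1 ∧ 0 < i ∧ aInner cur i (i + 1) < cur.length ∧
          cur.getD (i - 1) 0 = cur.getD (aInner cur i (i + 1)) 0
       then aFix cur i (aInner cur i (i + 1)) else cur)
      (aInner cur i (i + 1))
  else cur
termination_by cur.length - i
decreasing_by
  have h1 : i + 1 ≤ aInner cur i (i + 1) := aInner_ge cur i (i + 1)
  split
  · rw [aFix_length]; omega
  · omega

def include_isolated_points (lst : List Int) : List Int := aLoop lst 0

-- ===== PORT B =====
-- body of B's single sweep: `if lst[i] != lst[i-1] and lst[i-1] == lst[i+1]: lst[i] = lst[i-1]`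
def bStep (a : List Int) (i : Nat) : List Int :=
  if a.getD i 0 ≠ a.getD (i - 1) 0 ∧ a.getD (i - 1) 0 = a.getD (i + 1) 0
  then a.set i (a.getD (i - 1) 0) else a

-- `for i in range(1, len(lst) - 1): …`
def include_isolated_points_alt (lst : List Int) : List Int :=
  (List.range' 1 (lst.length - 2)).foldl bStep lst

-- ===== PRECONDITION & SPEC =====
def Spec_include_isolated_points (lst : List Int) (out : List Int) : Prop := out = include_isolated_points_alt lst
instance (lst : List Int) (out : List Int) : Decidable (Spec_include_isolated_points lst out) := by unfold Spec_include_isolated_points; infer_instance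

-- ===== CLAIM (what is proved, stated in full; the proofs are below) =====
def Claim_equal_include_isolated_points : Prop := ∀ (lst : List Int), Dom_include_isolated_points lst → Spec_include_isolated_points lst (include_isolated_points lst)

-- ===== LEMMAS AND PROOFS =====

theorem aInner_le (cur : List Int) (i j : Nat) (hj : j ≤ cur.length) :
    aInner cur i j ≤ cur.length := by
  fun_induction aInner with
  | case1 j h ih => exact ih (by omega)
  | case2 j h => exact hj

theorem aInner_run (cur : List Int) (i j : Nat) :
    ∀ k, j ≤ k → k < aInner cur i j → cur.getD k 0 = cur.getD i 0 := by
  fun_induction aInner with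
  | case1 j h ih =>
    intro k hk1 hk2
    rcases Nat.eq_or_lt_of_le hk1 with rfl | hlt
    · exact h.2
    · exact ih k (by omega) hk2
  | case2 j h => intro k hk1 hk2; omega

theorem aInner_stop (cur : List Int) (i j : Nat) :
    aInner cur i j = cur.length ∨
      (aInner cur i j < cur.length → cur.getD (aInner cur i j) 0 ≠ cur.getD i 0) := by
  fun_induction aInner with
  | case1 j h ih => exact ih
  | case2 j h =>
    right
    intro hlt heq
    exact h ⟨hlt, heq⟩

theorem bStep_noop1 (a : List Int) (k : Nat) (h : a.getD k 0 = a.getD (k - 1) 0) :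
    bStep a k = a := by
  unfold bStep
  rw [if_neg]
  rintro ⟨h1, -⟩
  exact h1 h

-- fold of bStep over a range of indices on which bStep is the identity
theorem foldl_noop (cur : List Int) (i m : Nat)
    (h : ∀ k, i ≤ k → k < i + m → bStep cur k = cur) :
    (List.range' i m).foldl bStep cur = cur := by
  induction m generalizing i with
  | zero => rfl
  | succ m ih =>
    rw [List.range'_succ, List.foldl_cons, h i (le_refl i) (by omega)]
    exact ih (i + 1) (fun k hk1 hk2 => h k (by omega) (by omega))

-- shifting the start of B's sweep forward across indices where bStep is the identity
theorem foldl_shift (cur : List Int) (i j : Nat) (hij : i ≤ j) (hj : j ≤ cur.length)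
    (hno : ∀ k, i ≤ k → k < j → k < cur.length - 1 → bStep cur k = cur) :
    (List.range' i (cur.length - 1 - i)).foldl bStep cur
      = (List.range' j (cur.length - 1 - j)).foldl bStep cur := by
  by_cases hi : i < cur.length - 1
  · have hm1 : i ≤ min j (cur.length - 1) := by omega
    have e2 : cur.length - 1 - i
        = (min j (cur.length - 1) - i) + (cur.length - 1 - min j (cur.length - 1)) := by omega
    have e1 : i + (min j (cur.length - 1) - i) = min j (cur.length - 1) := by omega
    rw [e2, ← List.range'_append_1, e1, List.foldl_append,
      foldl_noop cur i (min j (cur.length - 1) - i)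
        (fun k hk1 hk2 => hno k hk1 (by omega) (by omega))]
    by_cases hj2 : j ≤ cur.length - 1
    · rw [min_eq_left hj2]
    · rw [show cur.length - 1 - min j (cur.length - 1) = 0 from by omega,
        show cur.length - 1 - j = 0 from by omega, List.range'_zero, List.range'_zero]
  · rw [show cur.length - 1 - i = 0 from by omega,
      show cur.length - 1 - j = 0 from by omega]
    rfl

-- the main invariant: from any state cur and position i ≥ 1, A's remaining outer loop
-- equals B's remaining sweep over indices i .. cur.length-2
theorem main_inv (n : Nat) :
    ∀ (cur : List Int) (i : Nat), cur.length - i ≤ n → 1 ≤ i →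
      aLoop cur i = (List.range' i (cur.length - 1 - i)).foldl bStep cur := by
  induction n with
  | zero =>
    intro cur i hn hi
    rw [aLoop, dif_neg (by omega), show cur.length - 1 - i = 0 from by omega]
    rfl
  | succ n ih =>
    intro cur i hn hi
    rw [aLoop]
    by_cases hlt : i < cur.length - 1
    · rw [dif_pos hlt]
      set j := aInner cur i (i + 1) with hj
      have hge : i + 1 ≤ j := aInner_ge cur i (i + 1)
      have hle : j ≤ cur.length := aInner_le cur i (i + 1) (by omega)
      have hrun : ∀ k, i + 1 ≤ k → k < j → cur.getD k 0 = cur.getD i 0 :=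
        aInner_run cur i (i + 1)
      have hstop := aInner_stop cur i (i + 1)
      rw [← hj] at hstop
      by_cases hc : j - i = 1 ∧ 0 < i ∧ j < cur.length ∧ cur.getD (i - 1) 0 = cur.getD j 0
      · rw [if_pos hc]
        obtain ⟨hc1, hc2, hc3, hc4⟩ := hc
        have hji : j = i + 1 := by omega
        have hne : cur.getD j 0 ≠ cur.getD i 0 := by
          rcases hstop with h | h
          · omega
          · exact h hc3
        have hfix : aFix cur i j = cur.set i (cur.getD (i - 1) 0) := by
          unfold aFix
          rw [show j - i = 1 from hc1, show List.range' i 1 = [i] from rfl]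
          simp only [List.foldl_cons, List.foldl_nil]
          rw [if_pos]
          intro heq
          rw [heq, hc4] at hne
          exact hne rfl
        rw [hfix]
        have hlen' : (cur.set i (cur.getD (i - 1) 0)).length = cur.length := by
          rw [List.length_set]
        have := ih (cur.set i (cur.getD (i - 1) 0)) (i + 1)
          (by rw [hlen']; omega) (by omega)
        rw [hji, this, hlen']
        have estep : bStep cur i = cur.set i (cur.getD (i - 1) 0) := by
          unfold bStep
          rw [if_pos]
          refine ⟨?_, ?_⟩
          · intro heq
            rw [heq, hc4] at hne
            exact hne rfl
          · rw [← hji]; exact hc4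
        rw [show cur.length - 1 - i = (cur.length - 1 - (i + 1)) + 1 from by omega,
          List.range'_succ, List.foldl_cons, estep]
      · rw [if_neg hc]
        have hA := ih cur j (by omega) (by omega)
        have hno : ∀ k, i ≤ k → k < j → k < cur.length - 1 → bStep cur k = cur := by
          intro k hk1 hk2 hk3
          rcases Nat.eq_or_lt_of_le hk1 with rfl | hik
          · unfold bStep
            rw [if_neg]
            rintro ⟨h1, h2⟩
            by_cases hj1 : j = i + 1
            · exact hc ⟨by omega, by omega, by omega, by rw [hj1]; exact h2⟩
            · have hr : cur.getD (i + 1) 0 = cur.getD i 0 := hrun (i + 1) (by omega) (by omega)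
              rw [hr] at h2
              exact h1 h2.symm
          · apply bStep_noop1
            have h1 : cur.getD k 0 = cur.getD i 0 := hrun k (by omega) (by omega)
            have h2 : cur.getD (k - 1) 0 = cur.getD i 0 := by
              rcases Nat.eq_or_lt_of_le (show i ≤ k - 1 from by omega) with he | hlt2
              · rw [← he]
              · exact hrun (k - 1) (by omega) (by omega)
            rw [h1, h2]
        rw [hA, foldl_shift cur i j (by omega) hle hno]
    · rw [dif_neg hlt, show cur.length - 1 - i = 0 from by omega]
      rfl

theorem top_eq (lst : List Int) : aLoop lst 0 = include_isolated_points_alt lst := by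
  unfold include_isolated_points_alt
  rw [aLoop]
  by_cases h0 : 0 < lst.length - 1
  · rw [dif_pos h0]
    set j := aInner lst 0 1 with hj
    have hge : 1 ≤ j := aInner_ge lst 0 1
    have hle : j ≤ lst.length := aInner_le lst 0 1 (by omega)
    have hrun : ∀ k, 1 ≤ k → k < j → lst.getD k 0 = lst.getD 0 0 := aInner_run lst 0 1
    rw [if_neg (by rintro ⟨-, h, -⟩; omega)]
    rw [main_inv lst.length lst j (by omega) hge]
    rw [show lst.length - 2 = lst.length - 1 - 1 from by omega]
    refine (foldl_shift lst 1 j hge hle ?_).symm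
    intro k hk1 hk2 hk3
    apply bStep_noop1
    have h1 : lst.getD k 0 = lst.getD 0 0 := hrun k hk1 hk2
    have h2 : lst.getD (k - 1) 0 = lst.getD 0 0 := by
      rcases Nat.eq_or_lt_of_le (show 1 ≤ k from hk1) with he | hlt2
      · rw [← he]
      · exact hrun (k - 1) (by omega) (by omega)
    rw [h1, h2]
  · rw [dif_neg h0, show lst.length - 2 = 0 from by omega]
    rfl

-- ===== VERDICT (by name: the statement is the Claim_ definition above) =====
theorem include_isolated_points_spec : Claim_equal_include_isolated_points := by
  intro lst _
  unfold Spec_include_isolated_points include_isolated_points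
  exact top_eq lst
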